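-- pv_equiv track=rewrite | github.com/spoliv/Algorithms_Python_10.09.2019 | DZ/Lesson_4/task_2.py | simple_by_num
-- ===== SOURCE A (Python) =====
-- def simple_by_num(n):
--     m = 10
--     while True:
--         arr_simple = []
--         for i in range(2, m):
--             if i in (2, 3, 5, 7) or i % 2 != 0 and i % 3 != 0 and i % 5 != 0 and i % 7 != 0:
--                 arr_simple.append(i)
--         if len(arr_simple) < n:
--             m += 1
--         else:
--             break
--     return arr_simple[n - 1]
-- ===== SOURCE B (Python) =====
-- def simple_by_num(n):
--     # First four answers come straight from the list of small primes.
--     if n <= 4: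
--         return [2, 3, 5, 7][n - 1]
--     # Single incremental scan over odd candidates, counting matches;
--     # no list is ever built or rebuilt.
--     count, i = 4, 9
--     while True:
--         i += 2
--         if i % 3 and i % 5 and i % 7:
--             count += 1
--             if count == n:
--                 return i
-- ===== Notes on version B (the rewrite author's own statement) =====
-- stated objective: faster
-- what changed: A rebuilds the whole filtered list from scratch for every candidate upper bound m until it is long enough and then indexes it; B returns the first four answers from a literal [2,3,5,7] and otherwise streams odd candidates once with a running counter, returning the n-th qualifying number without ever building a list.
-- outside the precondition, e.g. on simple_by_num(-4): A raises IndexError, B raises IndexError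
import Mathlib
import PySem

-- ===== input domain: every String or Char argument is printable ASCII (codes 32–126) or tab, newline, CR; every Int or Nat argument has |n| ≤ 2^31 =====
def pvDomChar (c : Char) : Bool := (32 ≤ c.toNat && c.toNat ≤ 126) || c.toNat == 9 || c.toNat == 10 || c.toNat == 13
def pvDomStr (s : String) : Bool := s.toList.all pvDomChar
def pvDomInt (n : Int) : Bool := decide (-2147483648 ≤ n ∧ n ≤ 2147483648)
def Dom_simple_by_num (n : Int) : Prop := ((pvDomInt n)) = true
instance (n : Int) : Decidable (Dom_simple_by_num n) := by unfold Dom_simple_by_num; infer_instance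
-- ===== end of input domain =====

-- B replaces A's rebuild-the-whole-list-per-bound search by a single counting scan over odd
-- candidates (objective: faster).

-- ===== PORT A =====
-- fuel bound for A's while-loop: a totality guard only (the proofs show it is never exhausted on Pre_)
def pvFuelA (n : Int) : Nat := 210 * n.toNat + 4

def pvQual (i : Int) : Bool :=
  (i == 2 || i == 3 || i == 5 || i == 7) ||
  (!(PySem.Int.mod i 2 == 0) && !(PySem.Int.mod i 3 == 0) &&
   !(PySem.Int.mod i 5 == 0) && !(PySem.Int.mod i 7 == 0))

-- the body of A's for-loop: build arr_simple by appending each qualifying i in range(2, m)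
def pvArr (m : Int) : List Int :=
  (PySem.List.pyRange 2 m 1).foldl (fun acc i => if pvQual i then acc ++ [i] else acc) []

-- A's 'while True' loop: grow m until the list is long enough, then index it
def pvLoopA (n : Int) : Nat → Int → Int
  | 0, _ => 0
  | fuel + 1, m =>
    let arr := pvArr m
    if (arr.length : Int) < n then pvLoopA n fuel (m + 1)
    else (PySem.List.pyGet? arr (n - 1)).getD 0

def simple_by_num (n : Int) : Int := pvLoopA n (pvFuelA n) 10

-- ===== PORT B =====
-- fuel bound for B's while-loop: a totality guard only (the proofs show it is never exhausted on Pre_)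
def pvK (n : Int) : Nat := 105 * n.toNat + 1

def pvCop (i : Int) : Bool :=
  !(PySem.Int.mod i 3 == 0) && !(PySem.Int.mod i 5 == 0) && !(PySem.Int.mod i 7 == 0)

-- B's 'while True' loop: step i by 2, count qualifying numbers, stop at count == n
def pvLoopB (n : Int) : Nat → Int → Int → Int
  | 0, _, _ => 0
  | fuel + 1, count, i =>
    let i' := i + 2
    if pvCop i' then
      if count + 1 == n then i'
      else pvLoopB n fuel (count + 1) i'
    else pvLoopB n fuel count i'

def simple_by_num_alt (n : Int) : Int :=
  if n ≤ 4 then (PySem.List.pyGet? [2, 3, 5, 7] (n - 1)).getD 0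
  else pvLoopB n (pvK n) 4 9

-- ===== PRECONDITION & SPEC =====
-- Pre_ excludes exactly n ≤ -4, where A raises IndexError (arr_simple[n-1] on the 4-element list).
def Pre_simple_by_num (n : Int) : Prop := -3 ≤ n
instance (n : Int) : Decidable (Pre_simple_by_num n) := by unfold Pre_simple_by_num; infer_instance
def pvWitness_simple_by_num : Int := 5

def Spec_simple_by_num (n : Int) (out : Int) : Prop := out = simple_by_num_alt n
instance (n : Int) (out : Int) : Decidable (Spec_simple_by_num n out) := by unfold Spec_simple_by_num; infer_instance

-- ===== CLAIM (what is proved, stated in full; the proofs are below) =====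
def Claim_equal_simple_by_num : Prop := ∀ (n : Int), Dom_simple_by_num n → Pre_simple_by_num n → Spec_simple_by_num n (simple_by_num n)

-- ===== LEMMAS AND PROOFS =====

-- the filter A's inner for-loop computes
def pvF (m : Int) : List Int := (PySem.List.pyRange 2 m 1).filter pvQual

-- the odd candidates B visits: i+2, i+4, …, i+2k
def pvOdds : Int → Nat → List Int
  | _, 0 => []
  | i, k + 1 => (i + 2) :: pvOdds (i + 2) k

theorem pvArr_eq (m : Int) : pvArr m = pvF m := by
  simpa [pvArr, pvF] using
    PySem.List.foldl_append_if_eq_filter pvQual (PySem.List.pyRange 2 m 1) []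

theorem pvF_prefix (m m' : Int) (h1 : 2 ≤ m) (h2 : m ≤ m') :
    pvF m' = pvF m ++ (PySem.List.pyRange m m' 1).filter pvQual := by
  unfold pvF
  rw [PySem.List.pyRange_one_append 2 m m' h1 h2, List.filter_append]

theorem pvLoopA_eq (n : Int) (hn : 1 ≤ n) : ∀ (fuel : Nat) (m : Int), 2 ≤ m →
    n ≤ ((pvF (m + fuel)).length : Int) →
    pvLoopA n (fuel + 1) m = (pvF (m + fuel)).getD (n - 1).toNat 0 := by
  intro fuel
  induction fuel with
  | zero =>
    intro m hm hlen
    simp only [Nat.cast_zero, add_zero] at hlen ⊢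
    simp only [pvLoopA, pvArr_eq]
    have : ¬ (((pvF m).length : Int) < n) := by omega
    simp only [this, if_false]
    have h0 : (0 : Int) ≤ n - 1 := by omega
    rw [PySem.List.pyGet?_of_nonneg _ h0]
    simp [List.getD_eq_getElem?_getD]
  | succ fuel ih =>
    intro m hm hlen
    show (if ((pvArr m).length : Int) < n then pvLoopA n (fuel + 1) (m + 1)
          else (PySem.List.pyGet? (pvArr m) (n - 1)).getD 0) = _
    rw [pvArr_eq]
    by_cases hc : ((pvF m).length : Int) < n
    · rw [if_pos hc]
      have hre := ih (m + 1) (by omega) (by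
        have : m + 1 + (fuel : Int) = m + ((fuel : Nat) + 1 : Nat) := by push_cast; ring
        rw [this]; exact hlen)
      rw [hre]
      congr 2
      push_cast; ring
    · rw [if_neg hc]
      have hsplit := pvF_prefix m (m + ((fuel : Nat) + 1 : Nat)) hm (by push_cast; omega)
      have hidx : (n - 1).toNat < (pvF m).length := by omega
      have h0 : (0 : Int) ≤ n - 1 := by omega
      rw [PySem.List.pyGet?_of_nonneg _ h0, hsplit, List.getD_append _ _ _ _ hidx]
      simp [List.getD_eq_getElem?_getD]

theorem pvLoopB_eq (n : Int) : ∀ (fuel : Nat) (count i : Int), 0 ≤ count → count < n →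
    n - count ≤ (((pvOdds i fuel).filter pvCop).length : Int) →
    pvLoopB n fuel count i = ((pvOdds i fuel).filter pvCop).getD (n - count - 1).toNat 0 := by
  intro fuel
  induction fuel with
  | zero => intro count i h0 hlt hlen; simp [pvOdds] at hlen; omega
  | succ fuel ih =>
    intro count i h0 hlt hlen
    simp only [pvOdds] at hlen
    show (if pvCop (i + 2) then (if count + 1 == n then i + 2 else pvLoopB n fuel (count + 1) (i + 2))
          else pvLoopB n fuel count (i + 2)) = ((List.filter pvCop ((i + 2) :: pvOdds (i + 2) fuel)).getD (n - count - 1).toNat 0)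
    by_cases hc : pvCop (i + 2)
    · rw [if_pos hc, List.filter_cons_of_pos hc]
      by_cases he : count + 1 = n
      · rw [if_pos (by simpa using he)]
        have h0' : (n - count - 1).toNat = 0 := by omega
        simp [h0']
      · rw [if_neg (by simpa using he)]
        rw [ih (count + 1) (i + 2) (by omega) (by omega)
          (by rw [List.filter_cons_of_pos hc] at hlen; simp only [List.length_cons] at hlen; push_cast at hlen ⊢; omega)]
        have h1 : (n - count - 1).toNat = (n - (count + 1) - 1).toNat + 1 := by omega
        simp only [h1, List.getD_cons_succ]
    · rw [if_neg hc, List.filter_cons_of_neg hc]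
      exact ih count (i + 2) h0 hlt (by rwa [List.filter_cons_of_neg hc] at hlen)


theorem pvQual_odd (i : Int) (h9 : 9 ≤ i) (hodd : i % 2 = 1) : pvQual i = pvCop i := by
  have e2 : PySem.Int.mod i 2 = i % 2 := PySem.Int.mod_eq_emod_of_pos (by omega)
  have h2 : (i == 2) = false := by simp; omega
  have h3 : (i == 3) = false := by simp; omega
  have h5 : (i == 5) = false := by simp; omega
  have h7 : (i == 7) = false := by simp; omega
  simp [pvQual, pvCop, h2, h3, h5, h7, hodd]

theorem pvQual_even (i : Int) (h9 : 9 ≤ i) (heven : i % 2 = 0) : pvQual i = false := by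
  have e2 : PySem.Int.mod i 2 = i % 2 := PySem.Int.mod_eq_emod_of_pos (by omega)
  have h2 : (i == 2) = false := by simp; omega
  have h3 : (i == 3) = false := by simp; omega
  have h5 : (i == 5) = false := by simp; omega
  have h7 : (i == 7) = false := by simp; omega
  simp [pvQual, h2, h3, h5, h7, heven]

theorem pvOdds_snoc (k : Nat) : ∀ (i : Int), pvOdds i (k + 1) = pvOdds i k ++ [i + 2 * ((k : Int) + 1)] := by
  induction k with
  | zero =>
    intro i
    show [i + 2] = [] ++ [i + 2 * ((0 : Int) + 1)]
    norm_num
  | succ k ih =>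
    intro i
    show (i + 2) :: pvOdds (i + 2) (k + 1) = ((i + 2) :: pvOdds (i + 2) k) ++ _
    rw [ih (i + 2)]
    push_cast
    simp only [List.cons_append]
    congr 2
    ring

theorem pvF_eq_odds : ∀ (k : Nat), pvF (11 + 2 * k) = [2, 3, 5, 7] ++ (pvOdds 9 k).filter pvCop := by
  intro k
  induction k with
  | zero =>
    show pvF 11 = _
    simp only [pvOdds, List.filter_nil, List.append_nil]
    decide
  | succ k ih =>
    have hc2 : ((11 : Int) + 2 * (((k + 1 : Nat)) : Int)) = 11 + 2 * (k : Int) + 2 := by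
      push_cast; ring
    have hsp := pvF_prefix (11 + 2 * (k : Int)) (11 + 2 * (k : Int) + 2) (by omega) (by omega)
    have hr : PySem.List.pyRange (11 + 2 * (k : Int)) (11 + 2 * (k : Int) + 2) 1 =
        [11 + 2 * (k : Int), 11 + 2 * (k : Int) + 1] := by
      rw [PySem.List.pyRange_one_cons (by omega), PySem.List.pyRange_one_cons (by omega),
          PySem.List.pyRange_one_eq_nil (by omega)]
    have hq1 : pvQual (11 + 2 * (k : Int)) = pvCop (11 + 2 * (k : Int)) :=
      pvQual_odd _ (by omega) (by omega)
    have hq2 : pvQual (11 + 2 * (k : Int) + 1) = false := pvQual_even _ (by omega) (by omega)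
    have hsn : pvOdds 9 (k + 1) = pvOdds 9 k ++ [11 + 2 * (k : Int)] := by
      rw [pvOdds_snoc]
      have h9 : (9 : Int) + 2 * ((k : Int) + 1) = 11 + 2 * (k : Int) := by ring
      rw [h9]
    rw [hc2, hsp, hr, ih, hsn, List.filter_append]
    simp [List.filter, hq1, hq2]

theorem pvOdds_mem : ∀ (k : Nat) (i x : Int), i + 2 ≤ x → x ≤ i + 2 * k → x % 2 = i % 2 →
    x ∈ pvOdds i k := by
  intro k
  induction k with
  | zero => intro i x h1 h2 _; simp at h2; omega
  | succ k ih =>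
    intro i x h1 h2 h3
    simp only [pvOdds, List.mem_cons]
    by_cases he : x = i + 2
    · exact Or.inl he
    · refine Or.inr (ih (i + 2) x (by omega) (by push_cast at h2 ⊢; omega) (by omega))

theorem pvDensity (n : Int) (hn : 5 ≤ n) :
    n - 4 ≤ (((pvOdds 9 (pvK n)).filter pvCop).length : Int) := by
  have hmem : ∀ t : Nat, t < (n - 4).toNat →
      (11 + 210 * (t : Int)) ∈ (pvOdds 9 (pvK n)).filter pvCop := by
    intro t ht
    rw [List.mem_filter]
    refine ⟨?_, ?_⟩
    · apply pvOdds_mem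
      · omega
      · have h9 : (9 : Int) + 2 * ((pvK n : Nat) : Int) = 11 + 210 * ((n.toNat : Nat) : Int) := by
          unfold pvK; push_cast; ring
        rw [h9]; omega
      · omega
    · have e3 : PySem.Int.mod (11 + 210 * (t : Int)) 3 = (11 + 210 * (t : Int)) % 3 :=
        PySem.Int.mod_eq_emod_of_pos (by omega)
      have e5 : PySem.Int.mod (11 + 210 * (t : Int)) 5 = (11 + 210 * (t : Int)) % 5 :=
        PySem.Int.mod_eq_emod_of_pos (by omega)
      have e7 : PySem.Int.mod (11 + 210 * (t : Int)) 7 = (11 + 210 * (t : Int)) % 7 :=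
        PySem.Int.mod_eq_emod_of_pos (by omega)
      simp only [pvCop, e3, e5, e7]
      have h3 : (11 + 210 * (t : Int)) % 3 = 2 := by omega
      have h5 : (11 + 210 * (t : Int)) % 5 = 1 := by omega
      have h7 : (11 + 210 * (t : Int)) % 7 = 4 := by omega
      simp [h3, h5, h7]
  have hnd : ((List.range (n - 4).toNat).map (fun t : Nat => 11 + 210 * (t : Int))).Nodup := by
    apply List.Nodup.map (f := fun t : Nat => 11 + 210 * (t : Int))
    · intro a b hab
      simp only at hab
      omega
    · exact List.nodup_range
  have hsub : (List.range (n - 4).toNat).map (fun t : Nat => 11 + 210 * (t : Int)) ⊆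
      (pvOdds 9 (pvK n)).filter pvCop := by
    intro x hx
    obtain ⟨t, htmem, rfl⟩ := List.mem_map.mp hx
    exact hmem t (List.mem_range.mp htmem)
  have h1 : ((List.range (n - 4).toNat).map (fun t : Nat => 11 + 210 * (t : Int))).toFinset.card =
      ((List.range (n - 4).toNat).map (fun t : Nat => 11 + 210 * (t : Int))).length :=
    List.toFinset_card_of_nodup hnd
  have h2 : ((List.range (n - 4).toNat).map (fun t : Nat => 11 + 210 * (t : Int))).toFinset.card ≤
      ((pvOdds 9 (pvK n)).filter pvCop).toFinset.card :=
    Finset.card_le_card (fun a ha => List.mem_toFinset.mpr (hsub (List.mem_toFinset.mp ha)))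
  have h3 : ((pvOdds 9 (pvK n)).filter pvCop).toFinset.card ≤
      ((pvOdds 9 (pvK n)).filter pvCop).length := List.toFinset_card_le _
  have h4 : ((List.range (n - 4).toNat).map (fun t : Nat => 11 + 210 * (t : Int))).length =
      (n - 4).toNat := by simp
  omega

-- ===== VERDICT (by name: the statement is the Claim_ definition above) =====
theorem simple_by_num_spec : Claim_equal_simple_by_num := by
  intro n _ hpre
  unfold Spec_simple_by_num simple_by_num simple_by_num_alt
  unfold Pre_simple_by_num at hpre
  rw [show pvFuelA n = 2 * pvK n + 1 + 1 from by unfold pvFuelA pvK; omega]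
  by_cases h4 : n ≤ 4
  · -- the loop exits at once with m = 10; both sides index [2, 3, 5, 7]
    have harr : pvArr 10 = [2, 3, 5, 7] := by decide
    show pvLoopA n (2 * pvK n + 1 + 1) 10 = _
    simp only [pvLoopA, harr]
    simp [h4, show ¬ ((4 : Int) < n) from by omega]
  · -- n ≥ 5: both sides are the (n-5)-th element of the filtered odd stream
    have hn5 : 5 ≤ n := by omega
    have hden := pvDensity n hn5
    have hFlen : pvF (11 + 2 * ((pvK n : Nat) : Int)) = [2, 3, 5, 7] ++ (pvOdds 9 (pvK n)).filter pvCop :=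
      pvF_eq_odds (pvK n)
    have hcast : (10 : Int) + ((2 * pvK n + 1 : Nat) : Int) = 11 + 2 * ((pvK n : Nat) : Int) := by push_cast; ring
    have hA := pvLoopA_eq n (by omega) (2 * pvK n + 1) 10 (by omega)
      (by rw [hcast, hFlen]; simp; omega)
    rw [hcast] at hA
    show pvLoopA n (2 * pvK n + 1 + 1) 10 = _
    rw [hA, hFlen]
    have hB := pvLoopB_eq n (pvK n) 4 9 (by omega) (by omega) (by omega)
    simp only [h4, if_false]
    rw [hB]
    have hidx : (n - 1).toNat = 4 + (n - 4 - 1).toNat := by omega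
    rw [hidx]
    rw [show (4 + (n - 4 - 1).toNat) = ([2, 3, 5, 7] : List Int).length + (n - 4 - 1).toNat from by
      rw [show ([2, 3, 5, 7] : List Int).length = 4 from rfl]]
    rw [List.getD_append_right _ _ _ _ (Nat.le_add_right _ _)]
    congr 1
    omega
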